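-- pv_equiv track=rewrite | github.com/shankar-n/JGP-SSP-Codes-Shankar | code/viz.py | compute_config_job_coverage
-- ===== SOURCE A (Python) =====
-- def compute_config_job_coverage(hyperedges, num_configs):
--     coverage = [0] * num_configs
--     job_list = [[] for _ in range(num_configs)]
--
--     for j, configs in hyperedges.items():
--         for c in configs:
--             coverage[c] += 1
--             job_list[c].append(j)
--
--     return coverage, job_list
-- ===== SOURCE B (Python) =====
-- def compute_config_job_coverage(hyperedges, num_configs):
--     # Config-major traversal: for each config index, scan all hyperedges and
--     # collect one entry per occurrence of that config in a job's config list.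
--     job_list = [
--         [j for j, configs in hyperedges.items() for c in configs if c == target]
--         for target in range(num_configs)
--     ]
--     coverage = [len(jobs) for jobs in job_list]
--     return coverage, job_list
-- ===== Notes on version B (the rewrite author's own statement) =====
-- stated objective: alternative
-- what changed: B inverts the traversal: instead of A's job-major single pass that mutates two pre-sized index-addressed arrays, B builds job_list config-major (for each config index it rescans the hyperedges collecting matching jobs by equality, no indexed mutation at all) and then derives coverage as the lengths; Pre_ excludes duplicate job keys (the assoc-list rendering of A's dict parameter is ambiguous there), out-of-range config entries (A raises IndexError) and negative config entries (outside the natural domain of config indices, where A's list indexing accidentally wraps around).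
-- outside the precondition, e.g. on compute_config_job_coverage({1: [-1]}, 2): A returns ([0, 1], [[], [1]]), B returns ([0, 0], [[], []])
import Mathlib
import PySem

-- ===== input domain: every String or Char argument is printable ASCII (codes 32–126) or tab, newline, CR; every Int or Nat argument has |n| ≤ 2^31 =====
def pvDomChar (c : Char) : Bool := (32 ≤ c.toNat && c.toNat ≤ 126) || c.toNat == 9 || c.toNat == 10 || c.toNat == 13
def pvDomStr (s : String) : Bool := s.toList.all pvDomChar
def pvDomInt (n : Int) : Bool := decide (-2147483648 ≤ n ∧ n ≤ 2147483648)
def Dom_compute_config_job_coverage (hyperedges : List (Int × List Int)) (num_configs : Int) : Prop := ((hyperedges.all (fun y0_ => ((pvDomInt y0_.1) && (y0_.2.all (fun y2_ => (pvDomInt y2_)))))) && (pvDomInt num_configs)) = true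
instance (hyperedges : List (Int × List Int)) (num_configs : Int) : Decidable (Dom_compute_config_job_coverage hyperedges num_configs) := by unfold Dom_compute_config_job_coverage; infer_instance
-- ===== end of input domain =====

-- B builds job_list config-major (per config index, a fresh scan of the hyperedges collecting
-- matching jobs by equality) and derives coverage as the lengths, instead of A's job-major
-- single pass mutating two pre-sized index-addressed arrays (alternative traversal order).

-- ===== PORT A =====
def compute_config_job_coverage (hyperedges : List (Int × List Int)) (num_configs : Int) : List Int × List (List Int) :=
  let coverage : List Int := List.replicate num_configs.toNat 0
  let job_list : List (List Int) := (PySem.List.pyRange 0 num_configs 1).map (fun _ => ([] : List Int))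
  hyperedges.foldl
    (fun st jc =>
      jc.2.foldl
        (fun st c =>
          (PySem.List.pySetD st.1 c (PySem.List.pyGetD st.1 c 0 + 1),
           PySem.List.pySetD st.2 c (PySem.List.pyGetD st.2 c [] ++ [jc.1])))
        st)
    (coverage, job_list)

-- ===== PORT B =====
def compute_config_job_coverage_alt (hyperedges : List (Int × List Int)) (num_configs : Int) : List Int × List (List Int) :=
  -- [j for j, configs in hyperedges.items() for c in configs if c == target]
  let job_list : List (List Int) :=
    (PySem.List.pyRange 0 num_configs 1).map (fun target =>
      hyperedges.flatMap (fun jc =>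
        jc.2.filterMap (fun c => if c = target then some jc.1 else none)))
  let coverage : List Int := job_list.map (fun jobs => (jobs.length : Int))
  (coverage, job_list)

-- ===== PRECONDITION & SPEC =====
-- Pre_ excludes (a) duplicate job keys, on which the assoc-list rendering of A's dict
-- parameter is ambiguous (a Python dict collapses duplicates before A runs), and
-- (b) config entries outside [0, num_configs): configs are indices into num_configs slots,
-- so this is the function's natural domain — outside it A either raises IndexError
-- (c < -num_configs or c ≥ num_configs) or hits accidental negative-index wraparound.
def Pre_compute_config_job_coverage (hyperedges : List (Int × List Int)) (num_configs : Int) : Prop :=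
  (hyperedges.map Prod.fst).Nodup ∧
    ∀ jc ∈ hyperedges, ∀ c ∈ jc.2, 0 ≤ c ∧ c < num_configs
instance (hyperedges : List (Int × List Int)) (num_configs : Int) : Decidable (Pre_compute_config_job_coverage hyperedges num_configs) := by unfold Pre_compute_config_job_coverage; infer_instance

def pvWitness_compute_config_job_coverage : (List (Int × List Int)) × Int := ([(1, [0, 2]), (4, [1, 2])], 3)

def Spec_compute_config_job_coverage (hyperedges : List (Int × List Int)) (num_configs : Int) (out : List Int × List (List Int)) : Prop := out = compute_config_job_coverage_alt hyperedges num_configs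
instance (hyperedges : List (Int × List Int)) (num_configs : Int) (out : List Int × List (List Int)) : Decidable (Spec_compute_config_job_coverage hyperedges num_configs out) := by unfold Spec_compute_config_job_coverage; infer_instance

-- ===== CLAIM (what is proved, stated in full; the proofs are below) =====
def Claim_equal_compute_config_job_coverage : Prop := ∀ (hyperedges : List (Int × List Int)) (num_configs : Int), Dom_compute_config_job_coverage hyperedges num_configs → Pre_compute_config_job_coverage hyperedges num_configs → Spec_compute_config_job_coverage hyperedges num_configs (compute_config_job_coverage hyperedges num_configs)

-- ===== LEMMAS AND PROOFS =====

-- A's inner-loop step on the flattened (job, config) pair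
def pvStepA (st : List Int × List (List Int)) (p : Int × Int) : List Int × List (List Int) :=
  (PySem.List.pySetD st.1 p.2 (PySem.List.pyGetD st.1 p.2 0 + 1),
   PySem.List.pySetD st.2 p.2 (PySem.List.pyGetD st.2 p.2 [] ++ [p.1]))

-- jobs selected for config c among the flattened pairs
def pvSel (ps : List (Int × Int)) (c : Int) : List Int :=
  ps.filterMap (fun p => if p.2 = c then some p.1 else none)

lemma pv_foldl_nested {σ α β : Type} (g : σ → α × β → σ) (hs : List (α × List β)) (init : σ) :
    hs.foldl (fun st jc => jc.2.foldl (fun st c => g st (jc.1, c)) st) init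
      = (hs.flatMap (fun jc => jc.2.map (fun c => (jc.1, c)))).foldl g init := by
  induction hs generalizing init with
  | nil => rfl
  | cons h t ih => simp [List.foldl_append, List.foldl_map, ih]

lemma pv_setRange {α : Type} (n c : Int) (f : Int → α) (v : α) (h0 : 0 ≤ c) (_h1 : c < n) :
    PySem.List.pySetD ((PySem.List.pyRange 0 n 1).map f) c v
      = (PySem.List.pyRange 0 n 1).map (fun x => if x = c then v else f x) := by
  rw [PySem.List.pySetD_of_nonneg _ _ h0]
  apply List.ext_getElem
  · simp
  · intro i hi1 hi2
    simp only [List.getElem_set, List.getElem_map]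
    rw [PySem.List.getElem_pyRange_one]
    by_cases hic : i = c.toNat
    · simp [hic, Int.toNat_of_nonneg h0]
    · have h1' : ¬ c.toNat = i := fun h => hic h.symm
      simp only [h1', if_false]
      rw [if_neg (by omega : ¬ ((0 : Int) + i = c))]

lemma pv_getRange {α : Type} (n c : Int) (f : Int → α) (d : α) (h0 : 0 ≤ c) (h1 : c < n) :
    PySem.List.pyGetD ((PySem.List.pyRange 0 n 1).map f) c d = f c :=
  PySem.List.pyGetD_map_pyRange_of_nonneg f n c d h0 h1

lemma pv_main (n : Int) (ps : List (Int × Int)) (h : ∀ p ∈ ps, 0 ≤ p.2 ∧ p.2 < n)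
    (j : Int → List Int) :
    ps.foldl pvStepA
      ((PySem.List.pyRange 0 n 1).map (fun c => ((j c).length : Int)),
       (PySem.List.pyRange 0 n 1).map j)
    = ((PySem.List.pyRange 0 n 1).map (fun c => ((j c ++ pvSel ps c).length : Int)),
       (PySem.List.pyRange 0 n 1).map (fun c => j c ++ pvSel ps c)) := by
  induction ps generalizing j with
  | nil => simp [pvSel]
  | cons p t ih =>
    obtain ⟨h0, h1⟩ := h p (List.mem_cons_self ..)
    have ht : ∀ q ∈ t, 0 ≤ q.2 ∧ q.2 < n := fun q hq => h q (List.mem_cons_of_mem _ hq)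
    rw [List.foldl_cons]
    have hstep : pvStepA
        ((PySem.List.pyRange 0 n 1).map (fun c => ((j c).length : Int)),
         (PySem.List.pyRange 0 n 1).map j) p
      = ((PySem.List.pyRange 0 n 1).map
            (fun c => (((fun x => if x = p.2 then j x ++ [p.1] else j x) c).length : Int)),
         (PySem.List.pyRange 0 n 1).map (fun x => if x = p.2 then j x ++ [p.1] else j x)) := by
      unfold pvStepA
      rw [pv_getRange _ _ _ _ h0 h1, pv_getRange _ _ _ _ h0 h1,
          pv_setRange _ _ _ _ h0 h1, pv_setRange _ _ _ _ h0 h1]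
      rw [Prod.mk.injEq]
      constructor <;>
      · apply List.map_congr_left
        intro x _
        by_cases hx : x = p.2 <;> simp [hx]
    rw [hstep, ih ht]
    have hsel : ∀ c : Int,
        (if c = p.2 then j c ++ [p.1] else j c) ++ pvSel t c = j c ++ pvSel (p :: t) c := by
      intro c
      simp only [pvSel, List.filterMap_cons]
      by_cases hc : p.2 = c
      · rw [if_pos hc, if_pos hc.symm, List.append_assoc]; rfl
      · rw [if_neg hc, if_neg (fun h => hc h.symm)]
    rw [Prod.mk.injEq]
    constructor <;> · apply List.map_congr_left; intro x _; rw [hsel x]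

lemma pv_flat_sel (hs : List (Int × List Int)) (target : Int) :
    hs.flatMap (fun jc => jc.2.filterMap (fun c => if c = target then some jc.1 else none))
      = pvSel (hs.flatMap (fun jc => jc.2.map (fun c => (jc.1, c)))) target := by
  induction hs with
  | nil => rfl
  | cons h t ih =>
    simp only [List.flatMap_cons, pvSel, List.filterMap_append] at *
    rw [ih]
    congr 1
    rw [List.filterMap_map]
    rfl

-- ===== VERDICT (by name: the statement is the Claim_ definition above) =====
theorem compute_config_job_coverage_spec : Claim_equal_compute_config_job_coverage := by
  intro hs n _ hpre
  obtain ⟨_, hrange⟩ := hpre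
  have hflat : ∀ p ∈ hs.flatMap (fun jc => jc.2.map (fun c => ((jc.1 : Int), c))), 0 ≤ p.2 ∧ p.2 < n := by
    intro p hp
    simp only [List.mem_flatMap, List.mem_map] at hp
    obtain ⟨jc, hjc, c, hc, rfl⟩ := hp
    exact hrange jc hjc c hc
  unfold Spec_compute_config_job_coverage compute_config_job_coverage compute_config_job_coverage_alt
  simp only []
  rw [show (fun (st : List Int × List (List Int)) (jc : Int × List Int) =>
        jc.2.foldl (fun st c =>
          (PySem.List.pySetD st.1 c (PySem.List.pyGetD st.1 c 0 + 1),
           PySem.List.pySetD st.2 c (PySem.List.pyGetD st.2 c [] ++ [jc.1]))) st)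
      = (fun st jc => jc.2.foldl (fun st c => pvStepA st (jc.1, c)) st) from rfl]
  rw [pv_foldl_nested pvStepA hs]
  have hinit : (List.replicate n.toNat (0 : Int),
        (PySem.List.pyRange 0 n 1).map (fun _ => ([] : List Int)))
      = ((PySem.List.pyRange 0 n 1).map (fun c => ((([] : List Int)).length : Int)),
         (PySem.List.pyRange 0 n 1).map (fun _ => ([] : List Int))) := by
    simp [List.map_const', PySem.List.length_pyRange_one]
  rw [hinit, pv_main n _ hflat (fun _ => [])]
  rw [Prod.mk.injEq]
  constructor
  · rw [List.map_map]
    apply List.map_congr_left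
    intro x _
    simp [pv_flat_sel hs x]
  · apply List.map_congr_left
    intro x _
    simp [pv_flat_sel hs x]
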